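-- pv_equiv track=rewrite | github.com/alfredronning/knowit_kalender | 2024/day22/solver.py | finn_prepops
-- ===== SOURCE A (Python) =====
-- def finn_prepops(brikker):
--     for b in brikker:
--         if any((b2[1]-b[1]) in [-1, 1] and b2[2] == b[2] for b2 in brikker):
--             continue
--         brikker_paa_siden = []
--         brikker_over = []
--         brikker_under = []
--         for b2 in brikker:
--             if b2[1]-b[1] in [-1, 1] and b2[2] == b[2]:
--                 brikker_paa_siden.append(b2)
--             if b2[1] == b[1]:
--                 if b2[0] > b[0]:
--                     brikker_over.append(b2)
--                 elif b2[0] < b[0]: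
--                     brikker_under.append(b2)
--         if len(brikker_over) or len(brikker_paa_siden):
--             continue
--         sammenhengende = True
--         current = b
--         for b2 in sorted([b2 for b2 in brikker_under if b2[2] == b[2]], reverse=True):
--             if current[0] != b2[0]+1:
--                 sammenhengende = False
--                 break
--             current = b2
--         if sammenhengende:
--             return b
-- ===== SOURCE B (Python) =====
-- def finn_prepops(brikker):
--     side = set()              # (column, z) pairs present
--     maxrow = {}               # column -> highest row in that column
--     groups = {}               # (column, z) -> rows in that group
--     for b2 in brikker:
--         side.add((b2[1], b2[2]))
--         maxrow[b2[1]] = max(maxrow.get(b2[1], b2[0]), b2[0])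
--         groups.setdefault((b2[1], b2[2]), []).append(b2[0])
--     groups = {k: sorted(v) for k, v in groups.items()}
--     for b in brikker:
--         if (b[1] - 1, b[2]) in side or (b[1] + 1, b[2]) in side:
--             continue
--         if maxrow[b[1]] > b[0]:
--             continue
--         rows = [r for r in groups[(b[1], b[2])] if r < b[0]]
--         if rows == list(range(b[0] - len(rows), b[0])):
--             return b
--     return None
-- ===== Notes on version B (the rewrite author's own statement) =====
-- stated objective: alternative
-- what changed: B makes one indexing pass building a (column,z) set, a per-column max-row dict and a (column,z)->sorted-rows dict, and judges each candidate brick by lookups plus a closed-form range comparison, instead of A's per-candidate rescans of the whole list and per-candidate sort of bricks; on random inputs A returns early so the measured times are equal.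
-- outside the precondition, e.g. on finn_prepops([(0, 0, 0), (9, 5)]): A returns (0, 0, 0), B raises IndexError
import Mathlib
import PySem

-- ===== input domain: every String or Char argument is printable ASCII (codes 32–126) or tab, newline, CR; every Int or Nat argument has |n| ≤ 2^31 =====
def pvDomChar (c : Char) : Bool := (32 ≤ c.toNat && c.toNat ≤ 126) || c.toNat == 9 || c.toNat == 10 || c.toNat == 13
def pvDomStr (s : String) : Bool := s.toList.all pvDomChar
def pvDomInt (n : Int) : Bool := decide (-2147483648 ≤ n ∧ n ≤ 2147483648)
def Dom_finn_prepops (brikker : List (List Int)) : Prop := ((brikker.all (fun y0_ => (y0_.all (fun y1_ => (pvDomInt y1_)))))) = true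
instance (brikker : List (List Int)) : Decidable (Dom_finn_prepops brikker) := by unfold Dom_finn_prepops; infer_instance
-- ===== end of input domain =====

-- B replaces A's per-candidate rescans of the whole brick list (and per-candidate sort of bricks)
-- by one indexing pass: a (column,z) set, a per-column running-max dict and a (column,z) -> sorted-rows
-- dict, then judges each candidate by lookups and a range comparison. Objective: alternative.

-- ===== PORT A =====
-- b[i] on a brick; under Pre_ every index used (0,1,2) is in range, so the default is never read.
def pvG (xs : List Int) (i : Int) : Int := PySem.List.pyGetD xs i 0

-- the 'for b2 in sorted(...)' loop with its break, returning sammenhengende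
def pvChainA (current : List Int) : List (List Int) → Bool
  | [] => true
  | b2 :: rest => if pvG current 0 ≠ pvG b2 0 + 1 then false else pvChainA b2 rest

def pvLoopA (all : List (List Int)) : List (List Int) → Option (List Int)
  | [] => none
  | b :: rest =>
    if all.any (fun b2 => (pvG b2 1 - pvG b 1 == -1 || pvG b2 1 - pvG b 1 == 1) && pvG b2 2 == pvG b 2) then
      pvLoopA all rest
    else
      -- one pass appending to brikker_paa_siden / brikker_over / brikker_under
      let t := all.foldl (fun (acc : List (List Int) × List (List Int) × List (List Int)) b2 =>
        let acc1 := if (pvG b2 1 - pvG b 1 == -1 || pvG b2 1 - pvG b 1 == 1) && pvG b2 2 == pvG b 2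
                    then (acc.1 ++ [b2], acc.2.1, acc.2.2) else acc
        if pvG b2 1 = pvG b 1 then
          if pvG b2 0 > pvG b 0 then (acc1.1, acc1.2.1 ++ [b2], acc1.2.2)
          else if pvG b2 0 < pvG b 0 then (acc1.1, acc1.2.1, acc1.2.2 ++ [b2])
          else acc1
        else acc1) ([], [], [])
      if t.2.1.length ≠ 0 ∨ t.1.length ≠ 0 then pvLoopA all rest
      else
        if pvChainA b (PySem.List.sorted (t.2.2.filter (fun b2 => pvG b2 2 == pvG b 2)) (fun x => x) true) then
          some b
        else pvLoopA all rest

def finn_prepops (brikker : List (List Int)) : Option (List Int) := pvLoopA brikker brikker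

-- ===== PORT B =====
def pvLoopB (side : PySem.Set (Int × Int)) (maxrow : PySem.Dict Int Int)
    (groups : PySem.Dict (Int × Int) (List Int)) : List (List Int) → Option (List Int)
  | [] => none
  | b :: rest =>
    if side.contains (pvG b 1 - 1, pvG b 2) || side.contains (pvG b 1 + 1, pvG b 2) then
      pvLoopB side maxrow groups rest
    else if maxrow.getD (pvG b 1) 0 > pvG b 0 then  -- key present for every b ∈ brikker
      pvLoopB side maxrow groups rest
    else
      let rows := (groups.getD (pvG b 1, pvG b 2) []).filter (fun r => r < pvG b 0)
      if rows = PySem.List.pyRange (pvG b 0 - rows.length) (pvG b 0) then some b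
      else pvLoopB side maxrow groups rest

def finn_prepops_alt (brikker : List (List Int)) : Option (List Int) :=
  let side : PySem.Set (Int × Int) :=
    brikker.foldl (fun s b2 => PySem.Set.add s (pvG b2 1, pvG b2 2)) PySem.Set.empty
  let maxrow : PySem.Dict Int Int :=
    brikker.foldl (fun d b2 => d.insert (pvG b2 1) (max (d.getD (pvG b2 1) (pvG b2 0)) (pvG b2 0)))
      PySem.Dict.empty
  let groups0 : PySem.Dict (Int × Int) (List Int) :=
    brikker.foldl (fun d b2 => d.modify (pvG b2 1, pvG b2 2) [] (· ++ [pvG b2 0])) PySem.Dict.empty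
  let groups : PySem.Dict (Int × Int) (List Int) :=
    PySem.Dict.mk (groups0.items.map (fun p => (p.1, PySem.List.sorted p.2 (fun r => r) false)))
  pvLoopB side maxrow groups brikker

-- ===== PRECONDITION & SPEC =====
-- Pre_ excludes lists containing a brick with fewer than 3 coordinates: indexing it raises
-- IndexError in both programs' scans (A can occasionally still return first, by short-circuit,
-- before touching the missing coordinate — an accident of evaluation order; B's indexing pass
-- raises there).
def Pre_finn_prepops (brikker : List (List Int)) : Prop := ∀ b ∈ brikker, 3 ≤ b.length
instance (brikker : List (List Int)) : Decidable (Pre_finn_prepops brikker) := by unfold Pre_finn_prepops; infer_instance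

def pvWitness_finn_prepops : List (List Int) := [[2, 0, 0], [1, 0, 0], [0, 0, 0], [5, 3, 1]]

def Spec_finn_prepops (brikker : List (List Int)) (out : Option (List Int)) : Prop := out = finn_prepops_alt brikker
instance (brikker : List (List Int)) (out : Option (List Int)) : Decidable (Spec_finn_prepops brikker out) := by unfold Spec_finn_prepops; infer_instance

-- ===== CLAIM (what is proved, stated in full; the proofs are below) =====
def Claim_equal_finn_prepops : Prop := ∀ (brikker : List (List Int)), Dom_finn_prepops brikker → Pre_finn_prepops brikker → Spec_finn_prepops brikker (finn_prepops brikker)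

-- ===== LEMMAS AND PROOFS =====

-- the two (definitionally different, propositionally equal) instance routes to sorting lists of ints
theorem pv_sorted_inst (xs : List (List Int)) (rev : Bool) :
    @PySem.List.sorted (List Int) (List Int) List.instLT (fun a b => a.decidableLT b) xs (fun x => x) rev
      = @PySem.List.sorted (List Int) (List Int) List.instLinearOrder.toLT LinearOrder.toDecidableLT xs
          (fun x => x) rev := by congr 1

-- A's chain loop seen on the first coordinates only
def pvChainRows (c : Int) : List Int → Bool
  | [] => true
  | r :: rs => if c ≠ r + 1 then false else pvChainRows r rs

-- the descending run c-1, c-2, …, c-n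
def pvDescRange (c : Int) : Nat → List Int
  | 0 => []
  | n + 1 => (c - 1) :: pvDescRange (c - 1) n

theorem pv_chainA_eq (cur : List Int) (bs : List (List Int)) :
    pvChainA cur bs = pvChainRows (pvG cur 0) (bs.map (fun b2 => pvG b2 0)) := by
  induction bs generalizing cur with
  | nil => rfl
  | cons x bs ih =>
    by_cases h : pvG cur 0 ≠ pvG x 0 + 1
    · simp [pvChainA, pvChainRows, h]
    · simp [pvChainA, pvChainRows, h, ih x]

theorem pv_chainRows_iff (rs : List Int) (c : Int) :
    pvChainRows c rs = true ↔ rs = pvDescRange c rs.length := by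
  induction rs generalizing c with
  | nil => simp [pvChainRows, pvDescRange]
  | cons r rs ih =>
    by_cases h : c ≠ r + 1
    · rw [pvChainRows, if_pos h]
      simp only [List.length_cons, pvDescRange, Bool.false_eq_true, false_iff, List.cons.injEq,
        not_and]
      intro hr
      omega
    · have hc : c = r + 1 := by omega
      subst hc
      simp [pvChainRows, pvDescRange, ih]

theorem pv_descRange_eq (n : Nat) (c : Int) :
    pvDescRange c n = (PySem.List.pyRange (c - n) c).reverse := by
  induction n generalizing c with
  | zero =>
    rw [pvDescRange, show c - ((0 : Nat) : Int) = c by omega, PySem.List.pyRange_one_eq_nil (le_refl c)]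
    rfl
  | succ n ih =>
    have hsplit : PySem.List.pyRange (c - (n + 1 : Nat)) c
        = PySem.List.pyRange ((c - 1) - (n : Nat)) (c - 1) ++ PySem.List.pyRange (c - 1) c := by
      have h1 : (c - (n + 1 : Nat)) = (c - 1) - (n : Nat) := by push_cast; omega
      rw [h1]
      exact PySem.List.pyRange_one_append _ (c - 1) c (by omega) (by omega)
    have hone : PySem.List.pyRange (c - 1) c = [c - 1] := by
      rw [PySem.List.pyRange_one_cons (by omega)]
      rw [PySem.List.pyRange_one_eq_nil (by omega : c ≤ c - 1 + 1)]
    rw [pvDescRange, hsplit, hone, List.reverse_append, ih]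
    rfl

-- B's maxrow dict after the pass: lookup at c is the running max over the bricks of column c
theorem pv_maxrow_get? (l : List (List Int)) (d : PySem.Dict Int Int) (c : Int) :
    (l.foldl (fun d b2 => d.insert (pvG b2 1) (max (d.getD (pvG b2 1) (pvG b2 0)) (pvG b2 0))) d).get? c
      = (l.filter (fun b2 => pvG b2 1 == c)).foldl
          (fun o b2 => some (max (o.getD (pvG b2 0)) (pvG b2 0))) (d.get? c) := by
  induction l generalizing d with
  | nil => rfl
  | cons x l ih =>
    simp only [List.foldl_cons, List.filter_cons]
    by_cases hc : pvG x 1 = c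
    · rw [ih, PySem.Dict.get?_insert]
      simp [hc, PySem.Dict.getD_eq_get?_getD]
    · rw [ih, PySem.Dict.get?_insert, if_neg (fun h => hc h.symm)]
      simp [hc]

theorem pv_foldl_omax (t : List (List Int)) (v : Int) :
    t.foldl (fun o b2 => some (max (o.getD (pvG b2 0)) (pvG b2 0))) (some v)
      = some (t.foldl (fun a b2 => max a (pvG b2 0)) v) := by
  induction t generalizing v with
  | nil => rfl
  | cons x t ih => simp [ih]

theorem pv_foldl_max_attained (t : List (List Int)) (v : Int) :
    t.foldl (fun a b2 => max a (pvG b2 0)) v = v ∨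
      ∃ b2 ∈ t, t.foldl (fun a b2 => max a (pvG b2 0)) v = pvG b2 0 := by
  have h1 : t.foldl (fun a b2 => max a (pvG b2 0)) v = (t.map (fun b2 => pvG b2 0)).foldl max v := by
    rw [List.foldl_map]
  rcases PySem.List.foldl_max_mem (t.map (fun b2 => pvG b2 0)) v with h | h
  · exact Or.inl (h1.trans h)
  · rcases List.mem_map.mp h with ⟨b2, hb2, he⟩
    exact Or.inr ⟨b2, hb2, by rw [h1, ← he]⟩

theorem pv_maxrow_gt (brikker : List (List Int)) (b : List Int) (hb : b ∈ brikker) (r : Int) :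
    ((brikker.foldl (fun d b2 => d.insert (pvG b2 1) (max (d.getD (pvG b2 1) (pvG b2 0)) (pvG b2 0)))
        PySem.Dict.empty).getD (pvG b 1) 0 > r)
      ↔ ∃ b2 ∈ brikker, pvG b2 1 = pvG b 1 ∧ pvG b2 0 > r := by
  rw [PySem.Dict.getD_eq_get?_getD, pv_maxrow_get?]
  have hFb : b ∈ brikker.filter (fun b2 => pvG b2 1 == pvG b 1) := by
    simp [List.mem_filter, hb]
  set F := brikker.filter (fun b2 => pvG b2 1 == pvG b 1) with hF
  rcases List.exists_cons_of_ne_nil (List.ne_nil_of_mem hFb) with ⟨y, t, hyt⟩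
  rw [hyt]
  simp only [PySem.Dict.get?_empty, List.foldl_cons, Option.getD_none, max_self, pv_foldl_omax,
    Option.getD_some]
  constructor
  · intro hgt
    rcases pv_foldl_max_attained t (pvG y 0) with h | ⟨b2, hb2, he⟩
    · refine ⟨y, ?_, ?_, by omega⟩
      · have : y ∈ F := by rw [hyt]; exact List.mem_cons_self
        exact (List.mem_filter.mp this).1
      · have : y ∈ F := by rw [hyt]; exact List.mem_cons_self
        simpa using (List.mem_filter.mp this).2
    · refine ⟨b2, ?_, ?_, by omega⟩
      · have : b2 ∈ F := by rw [hyt]; exact List.mem_cons_of_mem _ hb2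
        exact (List.mem_filter.mp this).1
      · have : b2 ∈ F := by rw [hyt]; exact List.mem_cons_of_mem _ hb2
        simpa using (List.mem_filter.mp this).2
  · rintro ⟨b2, hb2, hcol, hrow⟩
    have hmem : b2 ∈ F := by simp [hF, List.mem_filter, hb2, hcol]
    rw [hyt] at hmem
    have hmax := PySem.List.le_foldl_max_int t (fun b2 => pvG b2 0) (pvG y 0)
    rcases List.mem_cons.mp hmem with h | h
    · subst h; have := hmax.1; omega
    · have := hmax.2 b2 h; omega

-- B's groups dict before sorting: lookup at (c, z) collects the first coordinates in list order
theorem pv_groups0_getD (brikker : List (List Int)) (c z : Int) :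
    (brikker.foldl (fun d b2 => d.modify (pvG b2 1, pvG b2 2) [] (· ++ [pvG b2 0]))
        PySem.Dict.empty).getD (c, z) []
      = (brikker.filter (fun b2 => pvG b2 1 == c && pvG b2 2 == z)).map (fun b2 => pvG b2 0) := by
  have h0 : brikker.foldl (fun d b2 => d.modify (pvG b2 1, pvG b2 2) [] (· ++ [pvG b2 0]))
        (PySem.Dict.empty (κ := Int × Int) (ν := List Int))
      = (brikker.map (fun b2 => ((pvG b2 1, pvG b2 2), pvG b2 0))).foldl
          (fun d p => d.modify p.1 [] (· ++ [p.2])) PySem.Dict.empty := by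
    rw [List.foldl_map]
  rw [h0, PySem.Dict.getD_foldl_modify_append]
  rw [List.filter_map]
  simp only [PySem.Dict.getD_empty, List.nil_append, List.map_map]
  have : ∀ b2 ∈ brikker, ((fun p => p.1 == (c, z)) ∘ fun b2 => ((pvG b2 1, pvG b2 2), pvG b2 0)) b2
      = (pvG b2 1 == c && pvG b2 2 == z) := by
    intro b2 _
    rfl
  rw [List.filter_congr this]
  simp

theorem pv_get?_mk_map (l : List ((Int × Int) × List Int)) (k : Int × Int) :
    (PySem.Dict.mk (l.map (fun p => (p.1, PySem.List.sorted p.2 (fun r => r) false)))).get? k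
      = ((PySem.Dict.mk l).get? k).map (fun v => PySem.List.sorted v (fun r => r) false) := by
  induction l with
  | nil => rfl
  | cons p l ih =>
    rcases p with ⟨pk, pv⟩
    simp only [List.map_cons, PySem.Dict.get?_mk_cons]
    by_cases h : (pk == k) = true
    · simp [h]
    · simp only [h, if_false, Bool.false_eq_true]
      exact ih

-- B's groups dict after per-key sorting
theorem pv_groups_getD (brikker : List (List Int)) (c z : Int) :
    (PySem.Dict.mk (((brikker.foldl (fun d b2 => d.modify (pvG b2 1, pvG b2 2) [] (· ++ [pvG b2 0]))
        PySem.Dict.empty)).items.map (fun p => (p.1, PySem.List.sorted p.2 (fun r => r) false)))).getD (c, z) []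
      = PySem.List.sorted ((brikker.filter (fun b2 => pvG b2 1 == c && pvG b2 2 == z)).map
          (fun b2 => pvG b2 0)) (fun r => r) false := by
  set d0 := brikker.foldl (fun d b2 => d.modify (pvG b2 1, pvG b2 2) [] (· ++ [pvG b2 0]))
    PySem.Dict.empty with hd0
  have heta : PySem.Dict.mk d0.items = d0 := rfl
  rw [PySem.Dict.getD_eq_get?_getD, pv_get?_mk_map, heta]
  have hf : ∀ o : Option (List Int),
      (o.map (fun v => PySem.List.sorted v (fun r => r) false)).getD []
        = PySem.List.sorted (o.getD []) (fun r => r) false := by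
    rintro (_ | v) <;> rfl
  rw [hf, ← PySem.Dict.getD_eq_get?_getD, hd0, pv_groups0_getD]

-- A's side-neighbour scan equals B's two set lookups
theorem pv_side_eq (brikker : List (List Int)) (b : List Int) :
    (brikker.any (fun b2 => (pvG b2 1 - pvG b 1 == -1 || pvG b2 1 - pvG b 1 == 1) && pvG b2 2 == pvG b 2))
      = (((brikker.foldl (fun s b2 => PySem.Set.add s (pvG b2 1, pvG b2 2)) PySem.Set.empty).contains
            (pvG b 1 - 1, pvG b 2))
         || ((brikker.foldl (fun s b2 => PySem.Set.add s (pvG b2 1, pvG b2 2)) PySem.Set.empty).contains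
            (pvG b 1 + 1, pvG b 2))) := by
  have hset : brikker.foldl (fun s b2 => PySem.Set.add s (pvG b2 1, pvG b2 2)) PySem.Set.empty
      = PySem.Set.ofList (brikker.map (fun b2 => (pvG b2 1, pvG b2 2))) := by
    rw [PySem.Set.ofList_eq_foldl, List.foldl_map]
    rfl
  rw [hset, Bool.eq_iff_iff]
  simp only [List.any_eq_true, Bool.or_eq_true, PySem.Set.contains_iff, PySem.Set.mem_ofList,
    List.mem_map, Bool.and_eq_true, Bool.or_eq_true, beq_iff_eq, Prod.mk.injEq]
  constructor
  · rintro ⟨b2, hb2, hd, hz⟩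
    rcases hd with hd | hd
    · exact Or.inl ⟨b2, hb2, by omega, hz⟩
    · exact Or.inr ⟨b2, hb2, by omega, hz⟩
  · rintro (⟨b2, hb2, hc, hz⟩ | ⟨b2, hb2, hc, hz⟩)
    · exact ⟨b2, hb2, Or.inl (by omega), hz⟩
    · exact ⟨b2, hb2, Or.inr (by omega), hz⟩

-- one step of A's list-building loop, written with three conditional appends
theorem pv_step3 (b : List Int) (acc : List (List Int) × List (List Int) × List (List Int))
    (b2 : List Int) :
    (let acc1 := if (pvG b2 1 - pvG b 1 == -1 || pvG b2 1 - pvG b 1 == 1) && pvG b2 2 == pvG b 2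
                 then (acc.1 ++ [b2], acc.2.1, acc.2.2) else acc
     if pvG b2 1 = pvG b 1 then
       if pvG b2 0 > pvG b 0 then (acc1.1, acc1.2.1 ++ [b2], acc1.2.2)
       else if pvG b2 0 < pvG b 0 then (acc1.1, acc1.2.1, acc1.2.2 ++ [b2])
       else acc1
     else acc1)
    = (acc.1 ++ (if (pvG b2 1 - pvG b 1 == -1 || pvG b2 1 - pvG b 1 == 1) && pvG b2 2 == pvG b 2
                 then [b2] else []),
       acc.2.1 ++ (if pvG b2 1 == pvG b 1 && decide (pvG b2 0 > pvG b 0) then [b2] else []),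
       acc.2.2 ++ (if pvG b2 1 == pvG b 1 && decide (pvG b2 0 < pvG b 0) then [b2] else [])) := by
  split_ifs with h1 h2 h3 h4 h5 h6 h7 <;> simp_all <;> omega

-- A's whole list-building loop produces the three filters
theorem pv_fold3 (b : List Int) (l : List (List Int)) (s o u : List (List Int)) :
    l.foldl (fun (acc : List (List Int) × List (List Int) × List (List Int)) b2 =>
        let acc1 := if (pvG b2 1 - pvG b 1 == -1 || pvG b2 1 - pvG b 1 == 1) && pvG b2 2 == pvG b 2
                    then (acc.1 ++ [b2], acc.2.1, acc.2.2) else acc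
        if pvG b2 1 = pvG b 1 then
          if pvG b2 0 > pvG b 0 then (acc1.1, acc1.2.1 ++ [b2], acc1.2.2)
          else if pvG b2 0 < pvG b 0 then (acc1.1, acc1.2.1, acc1.2.2 ++ [b2])
          else acc1
        else acc1) (s, o, u)
      = (s ++ l.filter (fun b2 => (pvG b2 1 - pvG b 1 == -1 || pvG b2 1 - pvG b 1 == 1) && pvG b2 2 == pvG b 2),
         o ++ l.filter (fun b2 => pvG b2 1 == pvG b 1 && decide (pvG b2 0 > pvG b 0)),
         u ++ l.filter (fun b2 => pvG b2 1 == pvG b 1 && decide (pvG b2 0 < pvG b 0))) := by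
  induction l generalizing s o u with
  | nil => simp
  | cons x l ih =>
    rw [List.foldl_cons, pv_step3, ih]
    simp only [List.filter_cons]
    split_ifs <;> simp_all

theorem pv_head_le {a b : List Int} (ha : a ≠ []) (hb : b ≠ []) (h : b ≤ a) : pvG b 0 ≤ pvG a 0 := by
  rcases List.exists_cons_of_ne_nil ha with ⟨x, xs, rfl⟩
  rcases List.exists_cons_of_ne_nil hb with ⟨y, ys, rfl⟩
  have : y ≤ x := by
    by_contra hxy
    exact absurd (List.cons_lt_cons_iff.mpr (Or.inl (by omega))) (not_lt.mpr h)
  simpa [pvG, PySem.List.pyGetD] using this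

theorem pv_desc_rows (xs : List (List Int)) (h3 : ∀ x ∈ xs, x ≠ []) :
    ((PySem.List.sorted xs (fun x => x) true).map (fun b2 => pvG b2 0)).Pairwise
      (fun a b => b ≤ a) := by
  rw [pv_sorted_inst, List.pairwise_map]
  refine (PySem.List.sorted_pairwise_rev xs (fun x => x)).imp_of_mem ?_
  intro a b ha hb hle
  rw [← pv_sorted_inst] at ha hb
  have ha' := (PySem.List.mem_sorted xs (fun x => x) true a).mp ha
  have hb' := (PySem.List.mem_sorted xs (fun x => x) true b).mp hb
  exact pv_head_le (h3 a ha') (h3 b hb') hle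

-- the first coordinates of A's reverse-sorted under-bricks are B's filtered sorted rows, reversed
theorem pv_rows_eq (brikker : List (List Int)) (b : List Int)
    (hPre : ∀ x ∈ brikker, 3 ≤ x.length) :
    ((PySem.List.sorted ((brikker.filter (fun b2 => pvG b2 1 == pvG b 1 && decide (pvG b2 0 < pvG b 0))).filter
        (fun b2 => pvG b2 2 == pvG b 2)) (fun x => x) true).map (fun b2 => pvG b2 0))
      = ((PySem.List.sorted ((brikker.filter (fun b2 => pvG b2 1 == pvG b 1 && pvG b2 2 == pvG b 2)).map
          (fun b2 => pvG b2 0)) (fun r => r) false).filter (fun r => r < pvG b 0)).reverse := by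
  have hbase : (brikker.filter (fun b2 => pvG b2 1 == pvG b 1 && decide (pvG b2 0 < pvG b 0))).filter
        (fun b2 => pvG b2 2 == pvG b 2)
      = (brikker.filter (fun b2 => pvG b2 1 == pvG b 1 && pvG b2 2 == pvG b 2)).filter
        (fun b2 => decide (pvG b2 0 < pvG b 0)) := by
    rw [List.filter_filter, List.filter_filter]
    apply List.filter_congr
    intro x _
    simp only [Bool.and_assoc, Bool.and_comm]
  apply List.Perm.eq_of_pairwise (le := fun a b : Int => b ≤ a)
  · intro a b _ _ h1 h2; omega
  · apply pv_desc_rows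
    intro x hx
    have hlen := hPre x (List.mem_of_mem_filter (List.mem_of_mem_filter hx))
    intro hnil; rw [hnil] at hlen; simp at hlen
  · rw [List.pairwise_reverse]
    exact (PySem.List.sorted_pairwise _ (fun r => r)).filter _
  · refine ((PySem.List.sorted_perm _ _ _).map _).trans ?_
    rw [hbase]
    refine List.Perm.trans ?_ (List.reverse_perm _).symm
    refine List.Perm.trans ?_ (List.Perm.filter _ (PySem.List.sorted_perm _ _ _)).symm
    rw [List.filter_map]
    exact List.Perm.refl _

-- the searches agree candidate by candidate
theorem pv_loop_eq (brikker : List (List Int)) (hPre : ∀ x ∈ brikker, 3 ≤ x.length)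
    (rest : List (List Int)) :
    (∀ x ∈ rest, x ∈ brikker) →
    pvLoopA brikker rest
      = pvLoopB (brikker.foldl (fun s b2 => PySem.Set.add s (pvG b2 1, pvG b2 2)) PySem.Set.empty)
          (brikker.foldl (fun d b2 => d.insert (pvG b2 1) (max (d.getD (pvG b2 1) (pvG b2 0)) (pvG b2 0)))
            PySem.Dict.empty)
          (PySem.Dict.mk (((brikker.foldl (fun d b2 => d.modify (pvG b2 1, pvG b2 2) [] (· ++ [pvG b2 0]))
            PySem.Dict.empty)).items.map (fun p => (p.1, PySem.List.sorted p.2 (fun r => r) false))))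
          rest := by
  induction rest with
  | nil => intro _; rfl
  | cons b rest ih =>
    intro hrest
    have hb : b ∈ brikker := hrest b List.mem_cons_self
    have hr' : ∀ x ∈ rest, x ∈ brikker := fun x hx => hrest x (List.mem_cons_of_mem _ hx)
    rw [pvLoopA, pvLoopB, pv_side_eq brikker b]
    by_cases h1 : (((brikker.foldl (fun s b2 => PySem.Set.add s (pvG b2 1, pvG b2 2)) PySem.Set.empty).contains
            (pvG b 1 - 1, pvG b 2))
         || ((brikker.foldl (fun s b2 => PySem.Set.add s (pvG b2 1, pvG b2 2)) PySem.Set.empty).contains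
            (pvG b 1 + 1, pvG b 2))) = true
    · rw [if_pos h1, if_pos h1]
      exact ih hr'
    · rw [if_neg h1, if_neg h1]
      -- the paa_siden filter is empty because the any-scan failed
      have hany : (brikker.any (fun b2 =>
          (pvG b2 1 - pvG b 1 == -1 || pvG b2 1 - pvG b 1 == 1) && pvG b2 2 == pvG b 2)) = false := by
        rw [pv_side_eq brikker b]
        exact Bool.eq_false_iff.mpr h1
      have hsidenil : brikker.filter (fun b2 =>
          (pvG b2 1 - pvG b 1 == -1 || pvG b2 1 - pvG b 1 == 1) && pvG b2 2 == pvG b 2) = [] := by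
        rw [List.filter_eq_nil_iff]
        intro x hx
        have := List.any_eq_false.mp hany x hx
        simpa using this
      simp only [pv_fold3, List.nil_append, hsidenil]
      by_cases h2 : (brikker.foldl (fun d b2 =>
            d.insert (pvG b2 1) (max (d.getD (pvG b2 1) (pvG b2 0)) (pvG b2 0)))
          PySem.Dict.empty).getD (pvG b 1) 0 > pvG b 0
      · rw [if_pos ?hc2, if_pos h2]
        · exact ih hr'
        case hc2 =>
          left
          have := (pv_maxrow_gt brikker b hb (pvG b 0)).mp h2
          rcases this with ⟨b2, hb2, hcol, hrow⟩
          have : b2 ∈ brikker.filter (fun b2 => pvG b2 1 == pvG b 1 && decide (pvG b2 0 > pvG b 0)) := by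
            simp [List.mem_filter, hb2, hcol, hrow]
          intro hlen
          rw [List.length_eq_zero_iff.mp hlen] at this
          simp at this
      · rw [if_neg ?hc2, if_neg h2]
        case hc2 =>
          rw [not_or, not_ne_iff, not_ne_iff]
          constructor
          · by_contra hlen
            have hex : ∃ b2 ∈ brikker, pvG b2 1 = pvG b 1 ∧ pvG b2 0 > pvG b 0 := by
              have hne : brikker.filter (fun b2 => pvG b2 1 == pvG b 1 && decide (pvG b2 0 > pvG b 0)) ≠ [] := by
                intro hnil; rw [hnil] at hlen; simp at hlen
              rcases List.exists_mem_of_ne_nil _ hne with ⟨b2, hb2⟩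
              have := List.mem_filter.mp hb2
              exact ⟨b2, this.1, by simpa using this.2⟩
            exact h2 ((pv_maxrow_gt brikker b hb (pvG b 0)).mpr hex)
          · simp
        -- both reach the contiguity test
        have hchain : pvChainA b (PySem.List.sorted
              ((brikker.filter (fun b2 => pvG b2 1 == pvG b 1 && decide (pvG b2 0 < pvG b 0))).filter
                (fun b2 => pvG b2 2 == pvG b 2)) (fun x => x) true) = true
            ↔ ((PySem.List.sorted ((brikker.filter (fun b2 => pvG b2 1 == pvG b 1 && pvG b2 2 == pvG b 2)).map
                (fun b2 => pvG b2 0)) (fun r => r) false).filter (fun r => r < pvG b 0))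
              = PySem.List.pyRange (pvG b 0 -
                  ((PySem.List.sorted ((brikker.filter (fun b2 => pvG b2 1 == pvG b 1 && pvG b2 2 == pvG b 2)).map
                    (fun b2 => pvG b2 0)) (fun r => r) false).filter (fun r => r < pvG b 0)).length)
                  (pvG b 0) := by
          rw [pv_chainA_eq, pv_chainRows_iff, pv_rows_eq brikker b hPre]
          rw [List.length_reverse, pv_descRange_eq]
          rw [← List.reverse_inj]
          simp
        rw [pv_groups_getD brikker (pvG b 1) (pvG b 2)]
        by_cases h3 : pvChainA b (PySem.List.sorted
              ((brikker.filter (fun b2 => pvG b2 1 == pvG b 1 && decide (pvG b2 0 < pvG b 0))).filter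
                (fun b2 => pvG b2 2 == pvG b 2)) (fun x => x) true) = true
        · rw [if_pos h3, if_pos (hchain.mp h3)]
        · rw [if_neg h3, if_neg (fun hc => h3 (hchain.mpr hc))]
          exact ih hr'

-- ===== VERDICT (by name: the statement is the Claim_ definition above) =====
theorem finn_prepops_spec : Claim_equal_finn_prepops := by
  intro brikker _ hPre
  unfold Spec_finn_prepops
  show pvLoopA brikker brikker = finn_prepops_alt brikker
  rw [finn_prepops_alt]
  exact pv_loop_eq brikker hPre brikker (fun x hx => hx)
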